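-- pv_equiv track=rewrite | github.com/larahoffman/algo1 | Python/guia7.py | reemplaza_posiciones_pares_for_in
-- ===== SOURCE A (Python) =====
-- def es_par(n:int) -> bool:
--     return (n % 2 == 0)
--
-- def reemplaza_posiciones_pares_for_in(s:list[int]) -> list[int]:
--     lista:list[int] = []
--     for i in range(0, len(s)):
--         if es_par(i):
--             lista.append(0)
--         else:
--             lista.append(s[i])
--     return lista
-- ===== SOURCE B (Python) =====
-- def reemplaza_posiciones_pares_for_in(s: list[int]) -> list[int]:
--     out = list(s)
--     out[::2] = [0] * ((len(out) + 1) // 2)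
--     return out
-- ===== Notes on version B (the rewrite author's own statement) =====
-- stated objective: idiomatic
-- what changed: B replaces A's index loop with parity branch and es_par helper by copying the list and zeroing the even positions with a single strided slice assignment of a replicated-zero block of length (len+1)//2.
import Mathlib
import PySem

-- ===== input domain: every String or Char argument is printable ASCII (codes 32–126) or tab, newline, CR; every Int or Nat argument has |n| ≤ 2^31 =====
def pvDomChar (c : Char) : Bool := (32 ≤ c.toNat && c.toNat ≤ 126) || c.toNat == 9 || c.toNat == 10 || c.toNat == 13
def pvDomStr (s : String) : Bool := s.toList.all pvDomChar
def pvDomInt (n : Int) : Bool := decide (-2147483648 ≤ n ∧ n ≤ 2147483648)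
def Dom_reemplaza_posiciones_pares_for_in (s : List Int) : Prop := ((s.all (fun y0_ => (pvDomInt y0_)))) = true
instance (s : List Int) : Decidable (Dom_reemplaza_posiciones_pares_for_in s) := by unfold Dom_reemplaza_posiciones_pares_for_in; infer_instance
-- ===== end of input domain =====

-- B replaces A's index loop (parity branch + es_par helper) by a copy plus one strided
-- slice assignment out[::2] = [0] * ((len+1)//2); same O(n) cost, no per-element branch.

-- ===== PORT A =====
def es_par (n : Int) : Bool := PySem.Int.mod n 2 == 0

def reemplaza_posiciones_pares_for_in (s : List Int) : List Int :=
  (PySem.List.pyRange 0 (s.length : Int) 1).foldl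
    (fun lista i =>
      if es_par i then lista ++ [0] else lista ++ [PySem.List.pyGetD s i 0])
    []

-- ===== PORT B =====
-- hand port of the slice assignment 'out[::2] = vs' (lengths match by construction,
-- exact on every input B reaches: vs has length (len(out)+1)//2)
def pvSliceAssignStep2 : List Int → List Int → List Int
  | l, [] => l
  | [], _ :: _ => []
  | [_], v :: _ => [v]
  | _ :: b :: rest, v :: vs => v :: b :: pvSliceAssignStep2 rest vs

def reemplaza_posiciones_pares_for_in_alt (s : List Int) : List Int :=
  pvSliceAssignStep2 s (List.replicate ((s.length + 1) / 2) 0)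

-- ===== PRECONDITION & SPEC =====
def Spec_reemplaza_posiciones_pares_for_in (s : List Int) (out : List Int) : Prop := out = reemplaza_posiciones_pares_for_in_alt s
instance (s : List Int) (out : List Int) : Decidable (Spec_reemplaza_posiciones_pares_for_in s out) := by unfold Spec_reemplaza_posiciones_pares_for_in; infer_instance

-- ===== CLAIM (what is proved, stated in full; the proofs are below) =====
def Claim_equal_reemplaza_posiciones_pares_for_in : Prop := ∀ (s : List Int), Dom_reemplaza_posiciones_pares_for_in s → Spec_reemplaza_posiciones_pares_for_in s (reemplaza_posiciones_pares_for_in s)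

-- ===== LEMMAS AND PROOFS =====

-- canonical form both ports are reduced to
def pvTarget : List Int → List Int
  | [] => []
  | [_] => [0]
  | _ :: b :: rest => 0 :: b :: pvTarget rest

theorem pvB_eq_target : ∀ s : List Int, reemplaza_posiciones_pares_for_in_alt s = pvTarget s
  | [] => rfl
  | [x] => by simp [reemplaza_posiciones_pares_for_in_alt, pvSliceAssignStep2, pvTarget]
  | a :: b :: rest => by
    have ih := pvB_eq_target rest
    simp only [reemplaza_posiciones_pares_for_in_alt] at ih ⊢
    have hlen : ((a :: b :: rest).length + 1) / 2 = (rest.length + 1) / 2 + 1 := by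
      simp [List.length_cons]; omega
    rw [hlen, List.replicate_succ]
    simpa [pvSliceAssignStep2, pvTarget] using ih

theorem pvA_map (s : List Int) :
    reemplaza_posiciones_pares_for_in s =
      (List.range s.length).map (fun k => if k % 2 = 0 then 0 else s.getD k 0) := by
  unfold reemplaza_posiciones_pares_for_in
  have hbody : (fun (lista : List Int) (i : Int) =>
        if es_par i then lista ++ [0] else lista ++ [PySem.List.pyGetD s i 0])
      = fun lista i => lista ++ [if es_par i then 0 else PySem.List.pyGetD s i 0] := by
    funext l i; split <;> rfl
  rw [hbody, PySem.List.foldl_append_singleton_eq_map, PySem.List.pyRange_zero_nat]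
  simp only [List.map_map, List.nil_append]
  refine List.map_congr_left ?_
  intro k hk
  simp only [Function.comp, es_par, PySem.List.pyGetD_natCast]
  rcases Nat.even_or_odd k with h | h
  · have h2 : k % 2 = 0 := Nat.even_iff.mp h
    simp [h2]
    intro hc; omega
  · have h2 : k % 2 = 1 := Nat.odd_iff.mp h
    simp [h2]
    intro hc; omega

theorem pvMap_target : ∀ s : List Int,
    (List.range s.length).map (fun k => if k % 2 = 0 then 0 else s.getD k 0) = pvTarget s
  | [] => rfl
  | [a] => by simp [pvTarget]
  | a :: b :: rest => by
    have ih := pvMap_target rest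
    have hlen : (a :: b :: rest).length = rest.length + 1 + 1 := by simp
    rw [hlen, List.range_succ_eq_map, List.range_succ_eq_map]
    simp only [List.map_cons, List.map_map]
    have h0 : (0 % 2 = 0) = True := by simp
    have : ∀ k, ((fun k => if k % 2 = 0 then 0 else (a :: b :: rest).getD k 0) ∘ (· + 1) ∘ (· + 1)) k
        = (fun k => if k % 2 = 0 then 0 else rest.getD k 0) k := by
      intro k
      simp only [Function.comp]
      have : (k + 1 + 1) % 2 = k % 2 := by omega
      rw [this]
      rcases Nat.eq_zero_or_pos (k % 2) with h | h <;> simp_all [List.getD]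
    rw [List.map_congr_left (fun k _ => this k), ih]
    simp [pvTarget]

theorem pvA_eq_target (s : List Int) : reemplaza_posiciones_pares_for_in s = pvTarget s := by
  rw [pvA_map, pvMap_target]

-- ===== VERDICT (by name: the statement is the Claim_ definition above) =====
theorem reemplaza_posiciones_pares_for_in_spec : Claim_equal_reemplaza_posiciones_pares_for_in := by
  intro s _
  unfold Spec_reemplaza_posiciones_pares_for_in
  rw [pvA_eq_target, pvB_eq_target]
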